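-- pv_equiv track=rewrite | github.com/Alb-O/lab | src/io/frontmatter.py | parse_existing_frontmatter
-- ===== SOURCE A (Python) =====
-- from typing import List, Set, Tuple
--
-- def parse_existing_frontmatter(original_lines: List[str]) -> Tuple[Set[str], int, List[str]]:
--     """
--     Parses existing frontmatter from a list of lines.
--     Returns:
--         - A set of existing tags.
--         - The line index of the closing '---' in original_lines (or -1 if no valid frontmatter).
--         - A list of the raw lines that constituted the frontmatter block (between '---' fences).
--     """
--     existing_tags: Set[str] = set()
--     frontmatter_end_line_idx = -1
--     frontmatter_content_lines: List[str] = []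
--
--     if not original_lines or original_lines[0].strip() != "---":
--         return existing_tags, frontmatter_end_line_idx, frontmatter_content_lines
--
--     try:
--         for i in range(1, len(original_lines)):
--             if original_lines[i].strip() == "---":
--                 frontmatter_end_line_idx = i
--                 break
--
--         if frontmatter_end_line_idx == -1: # No closing '---'
--             return existing_tags, -1, frontmatter_content_lines
--
--         frontmatter_content_lines = original_lines[1:frontmatter_end_line_idx]
--         is_tags_section = False
--         for line_content_fm_raw in frontmatter_content_lines:
--             line_content_fm_stripped = line_content_fm_raw.strip()
--             if line_content_fm_stripped.startswith("tags:"):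
--                 is_tags_section = True
--                 tag_value_str = line_content_fm_stripped.split("tags:", 1)[1].strip()
--                 if tag_value_str:
--                     if tag_value_str.startswith('[') and tag_value_str.endswith(']'): # Handle JSON-like array
--                         tag_value_str = tag_value_str[1:-1]
--                     for t in tag_value_str.split(','):
--                         cleaned_tag = t.strip()
--                         if cleaned_tag:
--                             existing_tags.add(cleaned_tag)
--             elif is_tags_section and line_content_fm_stripped.startswith("- "):
--                 existing_tags.add(line_content_fm_stripped[2:].strip())
--             elif is_tags_section and not (line_content_fm_stripped.startswith("  ") or line_content_fm_stripped.startswith("- ")):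
--                 is_tags_section = False # End of current tags section
--     except IndexError: # Should not happen with valid line list
--         return set(), -1, [] # Malformed, treat as no valid FM
--
--     return existing_tags, frontmatter_end_line_idx, frontmatter_content_lines
-- ===== SOURCE B (Python) =====
-- from typing import List, Set, Tuple
--
-- def _tag_step(state, raw_line):
--     tags, in_tags = state
--     s = raw_line.strip()
--     if s.startswith("tags:"):
--         in_tags = True
--         val = s.split("tags:", 1)[1].strip()
--         if val:
--             if val.startswith('[') and val.endswith(']'):
--                 val = val[1:-1]
--             for t in val.split(','):
--                 c = t.strip()
--                 if c:
--                     tags.add(c)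
--     elif in_tags and s.startswith("- "):
--         tags.add(s[2:].strip())
--     elif in_tags and not (s.startswith("  ") or s.startswith("- ")):
--         in_tags = False
--     return tags, in_tags
--
-- def parse_existing_frontmatter(original_lines: List[str]) -> Tuple[Set[str], int, List[str]]:
--     if not original_lines or original_lines[0].strip() != "---":
--         return set(), -1, []
--     content: List[str] = []
--     state = (set(), False)
--     for i in range(1, len(original_lines)):
--         line = original_lines[i]
--         if line.strip() == "---":
--             return state[0], i, content
--         content.append(line)
--         state = _tag_step(state, line)
--     return set(), -1, []
-- ===== Notes on version B (the rewrite author's own statement) =====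
-- stated objective: alternative
-- what changed: Replaces A's two sequential passes (first scan for the closing fence, then slice out the block and run the tag state machine over it) by a single forward scan from index 1 that maintains the content list and tag state as it goes and returns early at the closing fence, discarding the accumulated state if no fence is found.
import Mathlib
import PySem

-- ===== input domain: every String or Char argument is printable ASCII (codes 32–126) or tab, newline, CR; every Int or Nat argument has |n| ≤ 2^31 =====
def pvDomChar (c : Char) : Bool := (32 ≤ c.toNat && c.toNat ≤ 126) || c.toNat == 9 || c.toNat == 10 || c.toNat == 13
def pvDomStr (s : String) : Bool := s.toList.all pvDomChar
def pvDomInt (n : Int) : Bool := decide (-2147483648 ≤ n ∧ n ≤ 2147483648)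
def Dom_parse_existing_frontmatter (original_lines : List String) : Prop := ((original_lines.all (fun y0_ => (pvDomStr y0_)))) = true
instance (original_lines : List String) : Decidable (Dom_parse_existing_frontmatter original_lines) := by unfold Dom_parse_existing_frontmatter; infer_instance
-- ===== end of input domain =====

-- B fuses A's two passes (fence search, then tag parse over the slice) into one forward scan
-- with early return; same return value (the tag set is a PySem.Set built in identical add order).

-- ===== PORT A =====

-- The identical per-frontmatter-line tag state machine both Pythons contain
-- (state = (existing_tags, is_tags_section)); faithful to A's loop body.
-- The list index [1] after split("tags:", 1) is total here because the stripped
-- line starts with "tags:", so the split has two pieces (A's except-IndexError is unreachable).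
def pvTagStep (st : PySem.Set String × Bool) (raw : String) : PySem.Set String × Bool :=
  let s := PySem.Str.strip raw
  if PySem.Str.startswith s "tags:" then
    let tv := PySem.Str.strip (PySem.List.pyGetD ((PySem.Str.splitMax? s "tags:" 1).getD []) 1 "")
    if tv ≠ "" then
      let tv' := if PySem.Str.startswith tv "[" && PySem.Str.endswith tv "]"
                 then PySem.Str.slice tv (some 1) (some (-1)) else tv
      (((PySem.Str.split? tv' ",").getD []).foldl
        (fun acc t => let c := PySem.Str.strip t
                      if c ≠ "" then PySem.Set.add acc c else acc) st.1, true)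
    else (st.1, true)
  else if st.2 && PySem.Str.startswith s "- " then
    (PySem.Set.add st.1 (PySem.Str.strip (PySem.Str.slice s (some 2) none)), st.2)
  else if st.2 && !(PySem.Str.startswith s "  " || PySem.Str.startswith s "- ") then
    (st.1, false)
  else st

-- A's first loop: 'for i in range(1, len(original_lines)): if strip == "---": idx = i; break'
def pvFindFence (ls : List String) (i : Int) : Int :=
  match ls with
  | [] => -1
  | l :: rest => if PySem.Str.strip l = "---" then i else pvFindFence rest (i + 1)

def parse_existing_frontmatter (original_lines : List String) : List String × Int × List String :=
  match original_lines with
  | [] => ([], -1, [])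
  | first :: rest =>
    if PySem.Str.strip first ≠ "---" then ([], -1, [])
    else
      let idx := pvFindFence rest 1
      if idx = -1 then ([], -1, [])
      else
        let content := PySem.List.slice original_lines (some 1) (some idx)
        ((content.foldl pvTagStep ([], false)).1, idx, content)

-- ===== PORT B =====

-- B's single pass over lines[1:]: i is the running index, content the appended lines,
-- st the tag state; returns at the first closing fence, none if the list runs out.
def pvScanB (ls : List String) (i : Int) (content : List String)
    (st : PySem.Set String × Bool) : Option (List String × Int × List String) :=
  match ls with
  | [] => none
  | l :: rest =>
    if PySem.Str.strip l = "---" then some (st.1, i, content)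
    else pvScanB rest (i + 1) (content ++ [l]) (pvTagStep st l)

def parse_existing_frontmatter_alt (original_lines : List String) : List String × Int × List String :=
  match original_lines with
  | [] => ([], -1, [])
  | first :: rest =>
    if PySem.Str.strip first = "---" then (pvScanB rest 1 [] ([], false)).getD ([], -1, [])
    else ([], -1, [])

-- ===== PRECONDITION & SPEC =====
def Spec_parse_existing_frontmatter (original_lines : List String) (out : List String × Int × List String) : Prop := out = parse_existing_frontmatter_alt original_lines
instance (original_lines : List String) (out : List String × Int × List String) : Decidable (Spec_parse_existing_frontmatter original_lines out) := by unfold Spec_parse_existing_frontmatter; infer_instance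

-- ===== CLAIM (what is proved, stated in full; the proofs are below) =====
def Claim_equal_parse_existing_frontmatter : Prop := ∀ (original_lines : List String), Dom_parse_existing_frontmatter original_lines → Spec_parse_existing_frontmatter original_lines (parse_existing_frontmatter original_lines)

-- ===== LEMMAS AND PROOFS =====

-- If no line is a fence, the index search yields -1 and the scan yields none.
theorem pvNoFence (ls : List String) (h : ∀ l ∈ ls, PySem.Str.strip l ≠ "---") :
    ∀ (i : Int) (content : List String) (st : PySem.Set String × Bool),
      pvFindFence ls i = -1 ∧ pvScanB ls i content st = none := by
  induction ls with
  | nil => intro i content st; exact ⟨rfl, rfl⟩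
  | cons l rest ih =>
    intro i content st
    have hl : PySem.Str.strip l ≠ "---" := h l (by simp)
    have ih' := ih (fun x hx => h x (by simp [hx]))
    simp [pvFindFence, pvScanB, hl, (ih' (i+1) (content ++ [l]) (pvTagStep st l)).1,
          (ih' (i+1) (content ++ [l]) (pvTagStep st l)).2]

-- If some line is a fence, both the index search and the scan stop at the first one;
-- the scan's state is the fold of pvTagStep over the fence-free prefix.
theorem pvWithFence (ls : List String) (h : ∃ l ∈ ls, PySem.Str.strip l = "---") :
    ∀ (i : Int) (content : List String) (st : PySem.Set String × Bool),
      let p := ls.takeWhile (fun l => PySem.Str.strip l ≠ "---")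
      pvFindFence ls i = i + p.length ∧
      pvScanB ls i content st = some ((p.foldl pvTagStep st).1, i + p.length, content ++ p) := by
  induction ls with
  | nil => simp at h
  | cons l rest ih =>
    intro i content st
    by_cases hl : PySem.Str.strip l = "---"
    · simp [pvFindFence, pvScanB, hl, List.takeWhile]
    · have hrest : ∃ x ∈ rest, PySem.Str.strip x = "---" := by
        rcases h with ⟨x, hx, hxs⟩
        rcases List.mem_cons.mp hx with rfl | hx'
        · exact absurd hxs hl
        · exact ⟨x, hx', hxs⟩
      obtain ⟨h1, h2⟩ := ih hrest (i + 1) (content ++ [l]) (pvTagStep st l)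
      refine ⟨?_, ?_⟩
      · simp only [pvFindFence, if_neg hl, h1, List.takeWhile_cons]
        simp [hl]
        ring
      · simp only [pvScanB, if_neg hl, h2, List.takeWhile_cons]
        simp [hl]
        ring

-- ===== VERDICT (by name: the statement is the Claim_ definition above) =====
theorem parse_existing_frontmatter_spec : Claim_equal_parse_existing_frontmatter := by
  intro ol _
  unfold Spec_parse_existing_frontmatter
  match ol with
  | [] => rfl
  | first :: rest =>
    unfold parse_existing_frontmatter parse_existing_frontmatter_alt
    by_cases hf : PySem.Str.strip first = "---"
    · simp only [hf, ite_true, if_neg (by simp : ¬ ("---" : String) ≠ "---")]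
      by_cases hfe : ∃ l ∈ rest, PySem.Str.strip l = "---"
      · obtain ⟨h1, h2⟩ := pvWithFence rest hfe 1 [] ([], false)
        set p := rest.takeWhile (fun l => PySem.Str.strip l ≠ "---") with hp
        have hlen : pvFindFence rest 1 = 1 + (p.length : Int) := h1
        have hne : pvFindFence rest 1 ≠ -1 := by omega
        simp only [hlen, h2, if_neg (by omega : (1 : Int) + (p.length : Int) ≠ -1)]
        have hpref : p <+: rest := List.takeWhile_prefix _
        have hslice : PySem.List.slice (first :: rest) (some 1) (some (1 + (p.length : Int)))
            = p := by
          rw [PySem.List.slice_toNat _ (by omega) (by omega)]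
          have : ((1 + (p.length : Int)).toNat - (1 : Int).toNat) = p.length := by omega
          rw [this]
          simpa using (List.prefix_iff_eq_take.mp hpref).symm
        simp [hslice, Option.getD]
      · have hfe' : ∀ l ∈ rest, PySem.Str.strip l ≠ "---" := fun l hl hs => hfe ⟨l, hl, hs⟩
        obtain ⟨h1, h2⟩ := pvNoFence rest hfe' 1 [] ([], false)
        simp [h1, h2]
    · simp [hf]
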